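-- pv_equiv track=rewrite | github.com/piotrhelm/NESTFUL | data_v2/executable_functions/py_code_file_3804.py | sum_dictionary_of_dictionaries
-- ===== SOURCE A (Python) =====
-- from typing import Dict
--
-- def sum_dictionary_of_dictionaries(d: Dict[str, Dict[str, int]]) -> Dict[str, int]:
--
--     """Sum the values of a dictionary of dictionaries.
--
--
--
--     Args:
--
--         d: A dictionary of dictionaries.
--
--
--
--     Returns:
--
--         A dictionary with the sum of the values for each key.
--
--     """
--
--     result = {}
--
--     for key, inner_dict in d.items():
--
--         for inner_key, value in inner_dict.items():
--
--             if inner_key in result: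
--
--                 result[inner_key] += value
--
--             else:
--
--                 result[inner_key] = value
--
--     return result
-- ===== SOURCE B (Python) =====
-- def sum_dictionary_of_dictionaries(d):
--     """Sum the values of a dictionary of dictionaries."""
--     keys = []
--     for inner in d.values():
--         for k in inner:
--             if k not in keys:
--                 keys.append(k)
--     return {k: sum(inner[k] for inner in d.values() if k in inner) for k in keys}
-- ===== Notes on version B (the rewrite author's own statement) =====
-- stated objective: alternative
-- what changed: Replaces A's single grouped accumulation into a result dict by two differently-shaped passes: one pass collecting the distinct inner keys in first-encounter order, then a per-key pass summing that key's value across every inner dict.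
import Mathlib
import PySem

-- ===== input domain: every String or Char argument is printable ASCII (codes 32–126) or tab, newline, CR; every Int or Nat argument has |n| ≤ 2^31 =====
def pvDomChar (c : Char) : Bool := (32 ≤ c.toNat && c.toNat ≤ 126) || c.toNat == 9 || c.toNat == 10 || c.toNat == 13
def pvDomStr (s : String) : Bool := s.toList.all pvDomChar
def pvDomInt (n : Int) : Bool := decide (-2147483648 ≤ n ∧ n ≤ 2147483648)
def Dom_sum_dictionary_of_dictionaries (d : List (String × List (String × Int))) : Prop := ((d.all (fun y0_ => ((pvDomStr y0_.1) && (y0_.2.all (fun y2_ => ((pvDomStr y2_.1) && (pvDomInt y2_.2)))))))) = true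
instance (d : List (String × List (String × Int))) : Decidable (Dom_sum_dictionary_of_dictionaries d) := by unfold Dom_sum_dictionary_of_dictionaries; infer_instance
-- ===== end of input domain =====

-- B replaces A's single grouped dict accumulation by a first-encounter key-collection pass
-- followed by a per-key summation pass over all inner dicts (alternative decomposition, not faster).

-- ===== PORT A =====
def sum_dictionary_of_dictionaries (d : List (String × List (String × Int))) : List (String × Int) :=
  let result := d.foldl (fun result p =>
      p.2.foldl (fun result q =>
        if result.contains q.1 then result.insert q.1 (result.getD q.1 0 + q.2)
        else result.insert q.1 q.2) result)
    (PySem.Dict.empty)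
  result.items

-- ===== PORT B =====
def sum_dictionary_of_dictionaries_alt (d : List (String × List (String × Int))) : List (String × Int) :=
  let keys : List String := d.foldl (fun ks p =>
      p.2.foldl (fun ks q => if ks.contains q.1 then ks else ks ++ [q.1]) ks) []
  keys.map (fun k => (k,
    d.foldl (fun s p =>
      if (PySem.Dict.mk p.2).contains k then s + (PySem.Dict.mk p.2).getD k 0 else s) 0))

-- ===== PRECONDITION & SPEC =====
-- Pre_ requires every inner association list to have pairwise-distinct keys — the invariant of
-- the Python dict type of A's parameter; a Python caller cannot pass an inner dict that violates it.
def Pre_sum_dictionary_of_dictionaries (d : List (String × List (String × Int))) : Prop :=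
  ∀ p ∈ d, (p.2.map Prod.fst).Nodup
instance (d : List (String × List (String × Int))) : Decidable (Pre_sum_dictionary_of_dictionaries d) := by unfold Pre_sum_dictionary_of_dictionaries; infer_instance
def pvWitness_sum_dictionary_of_dictionaries : (List (String × List (String × Int))) :=
  [("a", [("x", 1), ("y", 2)]), ("b", [("x", 3)])]

def Spec_sum_dictionary_of_dictionaries (d : List (String × List (String × Int))) (out : List (String × Int)) : Prop := out = sum_dictionary_of_dictionaries_alt d
instance (d : List (String × List (String × Int))) (out : List (String × Int)) : Decidable (Spec_sum_dictionary_of_dictionaries d out) := by unfold Spec_sum_dictionary_of_dictionaries; infer_instance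

-- ===== CLAIM (what is proved, stated in full; the proofs are below) =====
def Claim_equal_sum_dictionary_of_dictionaries : Prop := ∀ (d : List (String × List (String × Int))), Dom_sum_dictionary_of_dictionaries d → Pre_sum_dictionary_of_dictionaries d → Spec_sum_dictionary_of_dictionaries d (sum_dictionary_of_dictionaries d)

-- ===== LEMMAS AND PROOFS =====

-- A's loop body is a weighted 'modify'.
theorem pvStepA_eq_modify (r : PySem.Dict String Int) (q : String × Int) :
    (if r.contains q.1 then r.insert q.1 (r.getD q.1 0 + q.2) else r.insert q.1 q.2)
      = r.modify q.1 0 (· + q.2) := by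
  by_cases h : r.contains q.1 = true
  · simp [h, PySem.Dict.modify]
  · have h' : r.contains q.1 = false := eq_false_of_ne_true h
    rw [if_neg h, PySem.Dict.modify, PySem.Dict.getD_of_not_contains _ _ h', zero_add]

-- lookup of the weighted-modify fold
theorem pvA_getD (ps : List (String × Int)) (r : PySem.Dict String Int) (k : String) :
    (ps.foldl (fun r q => r.modify q.1 0 (· + q.2)) r).getD k 0
      = r.getD k 0 + ((ps.filter (fun q => q.1 == k)).map (·.2)).sum := by
  induction ps generalizing r with
  | nil => simp
  | cons q ps ih =>
    simp only [List.foldl_cons, ih, PySem.Dict.getD_modify, List.filter_cons]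
    by_cases h : k = q.1
    · simp [h, add_assoc]
    · have : (q.1 == k) = false := by simp [Ne.symm h]
      simp [h, this]

-- one inner dict's contribution to key k
theorem pvInner (l : List (String × Int)) (k : String) (hnd : (l.map Prod.fst).Nodup) :
    (if (PySem.Dict.mk l).contains k then (PySem.Dict.mk l).getD k 0 else 0)
      = ((l.filter (fun q => q.1 == k)).map (·.2)).sum := by
  induction l with
  | nil => simp
  | cons q l ih =>
    obtain ⟨qk, qv⟩ := q
    simp only [List.map_cons, List.nodup_cons] at hnd
    by_cases h : qk = k
    · have hnm : k ∉ l.map Prod.fst := h ▸ hnd.1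
      have hfilt : l.filter (fun q => q.1 == k) = [] := by
        rw [List.filter_eq_nil_iff]
        intro a ha
        simp only [beq_iff_eq]
        intro hak
        exact hnm (hak ▸ List.mem_map_of_mem ha)
      simp [PySem.Dict.contains_mk, PySem.Dict.getD_eq_get?_getD, PySem.Dict.get?_mk_cons, h, hfilt]
    · have hne : (qk == k) = false := by simp [h]
      simp only [List.filter_cons, hne, Bool.false_eq_true, if_false]
      rw [← ih hnd.2]
      simp only [PySem.Dict.contains_mk, PySem.Dict.getD_eq_get?_getD, PySem.Dict.get?_mk_cons,
        List.any_cons, hne, Bool.false_or, Bool.false_eq_true, if_false]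

-- B's per-key summation loop computes the filtered sum over the flattened pairs
theorem pvB_sum (d : List (String × List (String × Int))) (k : String)
    (hpre : ∀ p ∈ d, (p.2.map Prod.fst).Nodup) (s0 : Int) :
    d.foldl (fun s p =>
        if (PySem.Dict.mk p.2).contains k then s + (PySem.Dict.mk p.2).getD k 0 else s) s0
      = s0 + (((d.flatMap (·.2)).filter (fun q => q.1 == k)).map (·.2)).sum := by
  induction d generalizing s0 with
  | nil => simp
  | cons p d ih =>
    have h1 := pvInner p.2 k (hpre p (List.mem_cons_self))
    have step : (if (PySem.Dict.mk p.2).contains k then s0 + (PySem.Dict.mk p.2).getD k 0 else s0)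
        = s0 + ((p.2.filter (fun q => q.1 == k)).map (·.2)).sum := by
      by_cases h : (PySem.Dict.mk p.2).contains k = true <;> simp [h] at h1 ⊢ <;> omega
    simp only [List.foldl_cons, step, ih (fun p hp => hpre p (List.mem_cons_of_mem _ hp)),
      List.flatMap_cons, List.filter_append, List.map_append, List.sum_append]
    ring

-- B's key-collection loop is ordered dedup of the flattened keys
theorem pvB_keys (d : List (String × List (String × Int))) :
    d.foldl (fun ks p =>
        p.2.foldl (fun ks q => if ks.contains q.1 then ks else ks ++ [q.1]) ks) []
      = PySem.Set.ofList ((d.flatMap (·.2)).map Prod.fst) := by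
  have hstep : ∀ (ks : List String) (q : String × Int),
      (if ks.contains q.1 then ks else ks ++ [q.1]) = PySem.Set.add ks q.1 := by
    intro ks q
    simp [PySem.Set.add, PySem.Set.contains]
  calc d.foldl (fun ks p =>
          p.2.foldl (fun ks q => if ks.contains q.1 then ks else ks ++ [q.1]) ks) []
      = (d.map (·.2)).foldl (fun ks l =>
          l.foldl (fun ks q => PySem.Set.add ks q.1) ks) [] := by
        rw [List.foldl_map]
        simp only [hstep]
    _ = (d.flatMap (·.2)).foldl (fun ks q => PySem.Set.add ks q.1) [] := by
        rw [List.flatMap_def, List.foldl_flatten]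
    _ = PySem.Set.ofList ((d.flatMap (·.2)).map Prod.fst) := by
        rw [← PySem.Set.update_map_eq_foldl_add, PySem.Set.update_nil_left]

theorem sum_dictionary_of_dictionaries_spec_aux (d : List (String × List (String × Int)))
    (hpre : Pre_sum_dictionary_of_dictionaries d) :
    sum_dictionary_of_dictionaries d = sum_dictionary_of_dictionaries_alt d := by
  unfold sum_dictionary_of_dictionaries sum_dictionary_of_dictionaries_alt
  have hA : d.foldl (fun result p =>
      p.2.foldl (fun result q =>
        if result.contains q.1 then result.insert q.1 (result.getD q.1 0 + q.2)
        else result.insert q.1 q.2) result) (PySem.Dict.empty)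
      = (d.flatMap (·.2)).foldl (fun r q => r.modify q.1 0 (· + q.2)) PySem.Dict.empty := by
    simp only [pvStepA_eq_modify]
    rw [List.flatMap_def, List.foldl_flatten, List.foldl_map]
  simp only [hA, pvB_keys]
  have hnd : ((d.flatMap (·.2)).foldl (fun r q => r.modify q.1 0 (· + q.2))
      PySem.Dict.empty).keys.Nodup :=
    PySem.Dict.nodup_keys_foldl_modify_key _ Prod.fst 0 (fun _ q => (· + q.2)) _
      PySem.Dict.nodup_keys_empty
  rw [PySem.Dict.items_eq_map_keys _ hnd 0]
  rw [PySem.Dict.keys_foldl_modify_key, PySem.Dict.keys_empty, PySem.Set.update_nil_left]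
  apply List.map_congr_left
  intro k _
  rw [pvA_getD, pvB_sum d k hpre 0, PySem.Dict.getD_empty]

-- ===== VERDICT (by name: the statement is the Claim_ definition above) =====
theorem sum_dictionary_of_dictionaries_spec : Claim_equal_sum_dictionary_of_dictionaries := by
  intro d _ hpre
  exact sum_dictionary_of_dictionaries_spec_aux d hpre
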